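-- pv_equiv track=rewrite | github.com/truenas/truenas_pyos | scripts/_setfacl.py | _parse_restore_file
-- ===== SOURCE A (Python) =====
-- def _parse_restore_file(text):
--     """Parse getfacl output into a list of (path, [entry_lines]) pairs."""
--     blocks = []
--     current_path = None
--     current_entries = []
--
--     for line in text.splitlines():
--         line = line.rstrip()
--         if not line:
--             if current_path is not None:
--                 blocks.append((current_path, current_entries))
--                 current_path = None
--                 current_entries = []
--         elif line.startswith('# file: '):
--             if current_path is not None:
--                 blocks.append((current_path, current_entries))
--             current_path = line[8:]
--             current_entries = []
--         elif line.startswith('#'):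
--             pass  # skip owner/group/fhandle comment lines
--         else:
--             if current_path is not None:
--                 current_entries.append(line)
--
--     if current_path is not None:
--         blocks.append((current_path, current_entries))
--
--     return blocks
-- ===== SOURCE B (Python) =====
-- def _parse_restore_file(text):
--     """Parse getfacl output into a list of (path, [entry_lines]) pairs.
--
--     Different decomposition from the flat state machine: one scanner that
--     jumps from header to header; for each '# file: ' header it gathers the
--     following entry lines (up to the next blank line or header) in an inner
--     scan, dropping '#' comment lines; everything outside a header's block
--     is skipped.
--     """
--     lines = [ln.rstrip() for ln in text.splitlines()]
--     n = len(lines)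
--     blocks = []
--     i = 0
--     while i < n:
--         line = lines[i]
--         i += 1
--         if not line.startswith('# file: '):
--             continue
--         entries = []
--         while i < n and lines[i] and not lines[i].startswith('# file: '):
--             if not lines[i].startswith('#'):
--                 entries.append(lines[i])
--             i += 1
--         blocks.append((line[8:], entries))
--     return blocks
-- ===== Notes on version B (the rewrite author's own statement) =====
-- stated objective: alternative
-- what changed: Replaces A's flat three-variable state machine (current_path/current_entries mutated per line, flushed on blank/header/EOF) with a two-level scanner: an outer loop that jumps from '# file: ' header to header and an inner scan that gathers each header's entry lines up to the next blank line or header, so no open-block state or final flush exists.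
import Mathlib
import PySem

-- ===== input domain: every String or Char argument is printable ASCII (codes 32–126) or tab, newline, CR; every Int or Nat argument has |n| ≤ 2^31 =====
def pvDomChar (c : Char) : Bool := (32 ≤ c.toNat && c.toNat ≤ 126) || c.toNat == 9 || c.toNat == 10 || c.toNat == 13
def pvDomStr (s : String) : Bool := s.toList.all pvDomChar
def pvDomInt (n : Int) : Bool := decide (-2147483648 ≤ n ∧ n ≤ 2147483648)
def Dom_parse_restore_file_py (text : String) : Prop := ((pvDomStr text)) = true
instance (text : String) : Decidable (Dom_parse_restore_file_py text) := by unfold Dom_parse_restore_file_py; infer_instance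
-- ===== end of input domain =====

-- B replaces A's flat three-variable state machine by a header-to-header scanner with an
-- inner entry-collecting scan (alternative decomposition, same cost).


-- ===== PORT A =====
-- state = (blocks, current_path, current_entries); one fold step per line of text.splitlines()
def pvStepA (st : List (String × List String) × Option String × List String) (line0 : String) :
    List (String × List String) × Option String × List String :=
  let line := PySem.Str.rstrip line0
  if line = "" then
    match st.2.1 with
    | some p => (st.1 ++ [(p, st.2.2)], none, [])
    | none => st
  else if PySem.Str.startswith line "# file: " then
    ((match st.2.1 with
      | some p => st.1 ++ [(p, st.2.2)]
      | none => st.1),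
     some (PySem.Str.slice line (some 8) none), [])
  else if PySem.Str.startswith line "#" then
    st
  else
    match st.2.1 with
    | some p => (st.1, some p, st.2.2 ++ [line])
    | none => st

def parse_restore_file_py (text : String) : List (String × List String) :=
  let st := (PySem.Str.splitlines text).foldl pvStepA ([], none, [])
  match st.2.1 with
  | some p => st.1 ++ [(p, st.2.2)]
  | none => st.1

-- ===== PORT B =====
-- inner scan: collect entry lines until a blank line or the next header; returns (entries, rest).
-- (Source B's index-based inner while loop, transcribed as recursion on the remaining lines.)
def pvCollect : List String → List String × List String
  | [] => ([], [])
  | l :: rest =>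
    if l = "" then ([], l :: rest)
    else if PySem.Str.startswith l "# file: " then ([], l :: rest)
    else
      let (es, rem) := pvCollect rest
      (if PySem.Str.startswith l "#" then es else l :: es, rem)

-- needed by pvScan's termination argument
theorem pvCollect_len (ls : List String) : (pvCollect ls).2.length ≤ ls.length := by
  induction ls with
  | nil => simp [pvCollect]
  | cons l rest ih =>
    simp only [pvCollect]
    split_ifs
    · simp
    · simp
    · simpa using Nat.le_succ_of_le ih
    · simpa using Nat.le_succ_of_le ih

-- outer scan: skip to the next '# file: ' header, emit its block, continue after it.
def pvScan (ls : List String) : List (String × List String) :=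
  match ls with
  | [] => []
  | l :: rest =>
    if PySem.Str.startswith l "# file: " then
      (PySem.Str.slice l (some 8) none, (pvCollect rest).1) :: pvScan (pvCollect rest).2
    else pvScan rest
termination_by ls.length
decreasing_by
  · have := pvCollect_len rest; simp; omega
  · simp

def parse_restore_file_py_alt (text : String) : List (String × List String) :=
  pvScan ((PySem.Str.splitlines text).map PySem.Str.rstrip)

-- ===== PRECONDITION & SPEC =====
def Spec_parse_restore_file_py (text : String) (out : List (String × List String)) : Prop := out = parse_restore_file_py_alt text
instance (text : String) (out : List (String × List String)) : Decidable (Spec_parse_restore_file_py text out) := by unfold Spec_parse_restore_file_py; infer_instance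

-- ===== CLAIM (what is proved, stated in full; the proofs are below) =====
def Claim_equal_parse_restore_file_py : Prop := ∀ (text : String), Dom_parse_restore_file_py text → Spec_parse_restore_file_py text (parse_restore_file_py text)

-- ===== LEMMAS AND PROOFS =====

-- A's step as a function of the already-rstripped line
def pvStep' (st : List (String × List String) × Option String × List String) (line : String) :
    List (String × List String) × Option String × List String :=
  if line = "" then
    match st.2.1 with
    | some p => (st.1 ++ [(p, st.2.2)], none, [])
    | none => st
  else if PySem.Str.startswith line "# file: " then
    ((match st.2.1 with
      | some p => st.1 ++ [(p, st.2.2)]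
      | none => st.1),
     some (PySem.Str.slice line (some 8) none), [])
  else if PySem.Str.startswith line "#" then
    st
  else
    match st.2.1 with
    | some p => (st.1, some p, st.2.2 ++ [line])
    | none => st

-- A's flush of the final state
def pvFinish (st : List (String × List String) × Option String × List String) : List (String × List String) :=
  match st.2.1 with
  | some p => st.1 ++ [(p, st.2.2)]
  | none => st.1

-- what B computes from the remaining (already rstripped) lines, given A's open block (if any)
def pvRest (cur : Option String) (entries : List String) (rs : List String) : List (String × List String) :=
  match cur with
  | none => pvScan rs
  | some p => (p, entries ++ (pvCollect rs).1) :: pvScan (pvCollect rs).2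

theorem pvMain : ∀ (rs : List String) (blocks : List (String × List String))
    (cur : Option String) (entries : List String),
    pvFinish (rs.foldl pvStep' (blocks, cur, entries)) = blocks ++ pvRest cur entries rs
  | [], blocks, cur, entries => by
    cases cur <;> simp [pvFinish, pvRest, pvScan, pvCollect]
  | r :: rs, blocks, cur, entries => by
    rw [List.foldl_cons]
    by_cases h0 : r = ""
    · subst h0
      cases cur with
      | none =>
        rw [show pvStep' (blocks, none, entries) "" = (blocks, none, entries) by
              simp [pvStep']]
        rw [pvMain rs]
        simp [pvRest, pvScan,
              show PySem.Chars.startswith [] ['#', ' ', 'f', 'i', 'l', 'e', ':', ' '] = false by decide]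
      | some p =>
        rw [show pvStep' (blocks, some p, entries) "" = (blocks ++ [(p, entries)], none, []) by
              simp [pvStep']]
        rw [pvMain rs]
        simp [pvRest, pvScan, pvCollect,
              show PySem.Chars.startswith [] ['#', ' ', 'f', 'i', 'l', 'e', ':', ' '] = false by decide]
    · by_cases h1 : PySem.Chars.startswith r.toList ['#', ' ', 'f', 'i', 'l', 'e', ':', ' '] = true
      · cases cur with
        | none =>
          rw [show pvStep' (blocks, none, entries) r
                = (blocks, some (PySem.Str.slice r (some 8) none), []) by
                simp [pvStep', h0, h1]]
          rw [pvMain rs]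
          simp [pvRest, pvScan, h1]
        | some p =>
          rw [show pvStep' (blocks, some p, entries) r
                = (blocks ++ [(p, entries)], some (PySem.Str.slice r (some 8) none), []) by
                simp [pvStep', h0, h1]]
          rw [pvMain rs]
          simp [pvRest, pvScan, pvCollect, h0, h1]
      · by_cases h2 : PySem.Chars.startswith r.toList ['#'] = true
        · rw [show pvStep' (blocks, cur, entries) r = (blocks, cur, entries) by
                cases cur <;> simp [pvStep', h0, h1, h2]]
          rw [pvMain rs]
          cases cur with
          | none => simp [pvRest, pvScan, h1]
          | some p => simp [pvRest, pvCollect, h0, h1, h2]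
        · cases cur with
          | none =>
            rw [show pvStep' (blocks, none, entries) r = (blocks, none, entries) by
                  simp [pvStep', h0, h1, h2]]
            rw [pvMain rs]
            simp [pvRest, pvScan, h1]
          | some p =>
            rw [show pvStep' (blocks, some p, entries) r
                  = (blocks, some p, entries ++ [r]) by
                  simp [pvStep', h0, h1, h2]]
            rw [pvMain rs]
            simp [pvRest, pvCollect, h0, h1, h2]

-- ===== VERDICT (by name: the statement is the Claim_ definition above) =====
theorem parse_restore_file_py_spec : Claim_equal_parse_restore_file_py := by
  intro text _
  unfold Spec_parse_restore_file_py parse_restore_file_py parse_restore_file_py_alt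
  have h : (PySem.Str.splitlines text).foldl pvStepA ([], none, [])
      = ((PySem.Str.splitlines text).map PySem.Str.rstrip).foldl pvStep' ([], none, []) := by
    rw [List.foldl_map]
    rfl
  rw [h]
  have := pvMain ((PySem.Str.splitlines text).map PySem.Str.rstrip) [] none []
  simpa [pvFinish, pvRest] using this
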